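-- pv_equiv track=rewrite | github.com/manjunath7901/LOC | simple_bitbucket_ui.py | parse_repositories
-- ===== SOURCE A (Python) =====
-- def parse_repositories(repo_input):
--     """Parse repository input - can be comma-separated or line-separated"""
--     if not repo_input:
--         return []
--
--     repos = []
--     for line in repo_input.split('\n'):
--         for repo in line.split(','):
--             repo = repo.strip()
--             if repo:
--                 repos.append(repo)
--
--     return repos
-- ===== SOURCE B (Python) =====
-- def parse_repositories(repo_input):
--     """Parse repository input - can be comma-separated or line-separated"""
--     repos = []
--     cur = []    # characters of the current token (trailing whitespace not yet committed)
--     pend = []   # run of whitespace seen since the last committed character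
--     for ch in repo_input:
--         if ch == ',' or ch == '\n':
--             if cur:
--                 repos.append(''.join(cur))
--             cur = []
--             pend = []
--         elif ch.isspace():
--             if cur:
--                 pend.append(ch)
--         else:
--             cur.extend(pend)
--             pend = []
--             cur.append(ch)
--     if cur:
--         repos.append(''.join(cur))
--     return repos
-- ===== Notes on version B (the rewrite author's own statement) =====
-- stated objective: alternative
-- what changed: A's nested newline-split/comma-split passes plus a per-token strip call are replaced by a single character-by-character state machine that builds tokens incrementally with a current-token buffer and a pending-whitespace run, never calling split or strip.
import Mathlib
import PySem

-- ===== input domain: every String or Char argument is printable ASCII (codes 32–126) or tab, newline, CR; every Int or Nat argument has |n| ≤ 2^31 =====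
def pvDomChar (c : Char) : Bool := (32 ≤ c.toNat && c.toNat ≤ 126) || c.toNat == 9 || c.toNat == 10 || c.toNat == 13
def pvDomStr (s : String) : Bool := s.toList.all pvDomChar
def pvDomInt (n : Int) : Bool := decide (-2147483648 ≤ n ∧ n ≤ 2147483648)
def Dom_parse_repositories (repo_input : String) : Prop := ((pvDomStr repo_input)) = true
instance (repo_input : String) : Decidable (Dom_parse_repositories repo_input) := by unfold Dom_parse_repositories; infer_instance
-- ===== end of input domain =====

-- B replaces A's nested split('\n')/split(',') passes plus per-token strip() by a single
-- character-by-character state machine (current-token buffer + pending-whitespace run); objective: alternative.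

-- ===== PORT A =====
def parse_repositories (repo_input : String) : List String :=
  if repo_input = "" then []       -- `if not repo_input: return []`
  else
    (PySem.Chars.splitOn repo_input.toList ['\n']).foldl (fun repos line =>
      (PySem.Chars.splitOn line [',']).foldl (fun repos repo =>
        let r := PySem.Chars.strip repo    -- repo = repo.strip()
        if r ≠ [] then repos ++ [String.ofList r] else repos) repos) []

-- ===== PORT B =====
-- one pass over the characters; state = (repos, cur, pend) as in Source B; final flush of cur
def parse_repositories_alt (repo_input : String) : List String :=
  let st := repo_input.toList.foldl
    (fun (st : List String × List Char × List Char) ch =>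
      let repos := st.1; let cur := st.2.1; let pend := st.2.2
      if ch = ',' ∨ ch = '\n' then
        ((if cur ≠ [] then repos ++ [String.ofList cur] else repos), [], [])
      else if PySem.Chars.isspace ch then
        (repos, cur, if cur ≠ [] then pend ++ [ch] else pend)
      else
        (repos, cur ++ pend ++ [ch], []))
    ([], [], [])
  if st.2.1 ≠ [] then st.1 ++ [String.ofList st.2.1] else st.1

-- ===== PRECONDITION & SPEC =====
def Spec_parse_repositories (repo_input : String) (out : List String) : Prop := out = parse_repositories_alt repo_input
instance (repo_input : String) (out : List String) : Decidable (Spec_parse_repositories repo_input out) := by unfold Spec_parse_repositories; infer_instance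

-- ===== CLAIM =====
def Claim_equal_parse_repositories : Prop := ∀ (repo_input : String), Dom_parse_repositories repo_input → Spec_parse_repositories repo_input (parse_repositories repo_input)

-- ===== LEMMAS AND PROOFS =====

-- reference single-character splitter (proof helper only)
def pvSp (c : Char) : List Char → List (List Char)
  | [] => [[]]
  | a :: t => if a = c then [] :: pvSp c t else (pvSp c t).modifyHead (a :: ·)

theorem pvSp_ne_nil (c : Char) (l : List Char) : pvSp c l ≠ [] := by
  induction l with
  | nil => simp [pvSp]
  | cons a t ih =>
    simp only [pvSp]
    split_ifs
    · simp
    · cases h : pvSp c t with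
      | nil => exact absurd h ih
      | cons x y => simp [List.modifyHead]

theorem pvSplitOn_go (c : Char) (fuel : Nat) (l cur acc : List Char) (hacc : List (List Char))
    (h : l.length ≤ fuel) :
    PySem.Chars.splitOn.go [c] fuel l cur hacc
      = hacc.reverse ++ (pvSp c l).modifyHead (cur.reverse ++ ·) := by
  induction fuel generalizing l cur hacc with
  | zero =>
    have : l = [] := by cases l <;> simp_all
    subst this
    simp [PySem.Chars.splitOn.go, pvSp, List.modifyHead]
  | succ fuel ih =>
    cases l with
    | nil => simp [PySem.Chars.splitOn.go, pvSp, List.modifyHead]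
    | cons a t =>
      by_cases hac : a = c
      · subst hac
        have hpre : List.isPrefixOf [a] (a :: t) = true := by simp [List.isPrefixOf]
        rw [show PySem.Chars.splitOn.go [a] (fuel+1) (a :: t) cur hacc
              = PySem.Chars.splitOn.go [a] fuel (List.drop 1 (a :: t)) [] (cur.reverse :: hacc) by
            simp [PySem.Chars.splitOn.go, hpre]]
        rw [ih _ _ _ (by simpa using h)]
        obtain ⟨h1, t1, ht⟩ : ∃ h1 t1, pvSp a t = h1 :: t1 := by
          cases hh : pvSp a t with
          | nil => exact absurd hh (pvSp_ne_nil a t)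
          | cons x y => exact ⟨x, y, rfl⟩
        simp [pvSp, ht, List.modifyHead]
      · have hpre : List.isPrefixOf [c] (a :: t) = false := by
          simp [List.isPrefixOf]; exact fun hh => (hac hh.symm).elim
        rw [show PySem.Chars.splitOn.go [c] (fuel+1) (a :: t) cur hacc
              = PySem.Chars.splitOn.go [c] fuel t (a :: cur) hacc by
            simp [PySem.Chars.splitOn.go, hpre]]
        rw [ih _ _ _ (by simpa using Nat.le_of_succ_le_succ h)]
        obtain ⟨h1, t1, ht⟩ : ∃ h1 t1, pvSp c t = h1 :: t1 := by
          cases hh : pvSp c t with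
          | nil => exact absurd hh (pvSp_ne_nil c t)
          | cons x y => exact ⟨x, y, rfl⟩
        simp [pvSp, hac, ht, List.modifyHead]

theorem pvSplitOn_eq (c : Char) (l : List Char) :
    PySem.Chars.splitOn l [c] = pvSp c l := by
  rw [PySem.Chars.splitOn, pvSplitOn_go c (l.length + 1) l [] [] [] (by omega)]
  obtain ⟨h1, t1, ht⟩ : ∃ h1 t1, pvSp c l = h1 :: t1 := by
    cases hh : pvSp c l with
    | nil => exact absurd hh (pvSp_ne_nil c l)
    | cons x y => exact ⟨x, y, rfl⟩
  simp [ht, List.modifyHead]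

-- combined splitter on both delimiters
def pvSpD : List Char → List (List Char)
  | [] => [[]]
  | a :: t => if a = ',' ∨ a = '\n' then [] :: pvSpD t else (pvSpD t).modifyHead (a :: ·)

theorem pvSpD_ne_nil (l : List Char) : pvSpD l ≠ [] := by
  induction l with
  | nil => simp [pvSpD]
  | cons a t ih =>
    simp only [pvSpD]
    split_ifs
    · simp
    · cases h : pvSpD t with
      | nil => exact absurd h ih
      | cons x y => simp [List.modifyHead]

-- splitting on '\n' then ',' = splitting on both at once
theorem pvSpD_eq (l : List Char) :
    pvSpD l = (pvSp '\n' l).flatMap (pvSp ',') := by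
  induction l with
  | nil => simp [pvSpD, pvSp]
  | cons a t ih =>
    obtain ⟨h1, t1, ht⟩ : ∃ h1 t1, pvSp '\n' t = h1 :: t1 := by
      cases hh : pvSp '\n' t with
      | nil => exact absurd hh (pvSp_ne_nil _ t)
      | cons x y => exact ⟨x, y, rfl⟩
    by_cases hn : a = '\n'
    · subst hn
      simp [pvSpD, pvSp, ht, ih, List.flatMap_cons]
    · by_cases hc : a = ','
      · subst hc
        simp only [pvSpD, if_pos (Or.inl rfl), pvSp, if_neg hn, ht, List.modifyHead,
          List.flatMap_cons, if_pos rfl, ih]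
        simp [ht, List.flatMap_cons]
      · obtain ⟨h2, t2, ht2⟩ : ∃ h2 t2, pvSp ',' h1 = h2 :: t2 := by
          cases hh : pvSp ',' h1 with
          | nil => exact absurd hh (pvSp_ne_nil _ h1)
          | cons x y => exact ⟨x, y, rfl⟩
        have hd : ¬ (a = ',' ∨ a = '\n') := by tauto
        simp only [pvSpD, if_neg hd, pvSp, if_neg hn, ht, List.modifyHead,
          List.flatMap_cons, if_neg hc, ht2, ih]
        simp [ht, List.flatMap_cons, ht2, List.modifyHead]

-- the token extractor both sides compute
def pvStripFn (t : List Char) : Option String :=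
  let s := PySem.Chars.strip t
  if s = [] then none else some (String.ofList s)

-- A's inner loop appends exactly the kept tokens
theorem pvInner_eq (pieces : List (List Char)) (repos : List String) :
    pieces.foldl (fun repos repo =>
        let r := PySem.Chars.strip repo
        if r ≠ [] then repos ++ [String.ofList r] else repos) repos
      = repos ++ pieces.filterMap pvStripFn := by
  induction pieces generalizing repos with
  | nil => simp
  | cons a t ih =>
    by_cases h : PySem.Chars.strip a = []
    · rw [List.foldl_cons,
        show (let r := PySem.Chars.strip a
              if r ≠ [] then repos ++ [String.ofList r] else repos) = repos by simp [h],
        ih]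
      simp [List.filterMap_cons, pvStripFn, h]
    · rw [List.foldl_cons,
        show (let r := PySem.Chars.strip a
              if r ≠ [] then repos ++ [String.ofList r] else repos)
            = repos ++ [String.ofList (PySem.Chars.strip a)] by simp [h],
        ih]
      simp [List.filterMap_cons, pvStripFn, h]

-- A's full result in terms of pvSpD
theorem pvA_eq (l : List Char) :
    (pvSp '\n' l).foldl (fun repos line =>
        (PySem.Chars.splitOn line [',']).foldl (fun repos repo =>
          let r := PySem.Chars.strip repo
          if r ≠ [] then repos ++ [String.ofList r] else repos) repos) []
      = (pvSpD l).filterMap pvStripFn := by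
  rw [pvSpD_eq, List.filterMap_flatMap]
  have : ∀ (lines : List (List Char)) (acc : List String),
      lines.foldl (fun repos line =>
        (PySem.Chars.splitOn line [',']).foldl (fun repos repo =>
          let r := PySem.Chars.strip repo
          if r ≠ [] then repos ++ [String.ofList r] else repos) repos) acc
      = acc ++ lines.flatMap (fun line => (pvSp ',' line).filterMap pvStripFn) := by
    intro lines
    induction lines with
    | nil => simp
    | cons a t ih =>
      intro acc
      simp only [List.foldl_cons]
      rw [pvSplitOn_eq, pvInner_eq, ih, List.flatMap_cons, List.append_assoc]
  simpa using this (pvSp '\n' l) []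

-- ---- B-side: the state machine ----

-- whitespace-run facts about rstrip / strip
theorem pvDropWhile_append_cons {p : Char → Bool} (x z : List Char) (a : Char) (ha : p a = false) :
    List.dropWhile p (x ++ a :: z) = List.dropWhile p x ++ a :: z := by
  induction x with
  | nil => simp [List.dropWhile, ha]
  | cons c r ih =>
    by_cases hc : p c
    · simp [List.dropWhile, hc, ih]
    · simp [List.dropWhile, hc]

theorem pvRstrip_append_cons (u v : List Char) (a : Char)
    (ha : PySem.Chars.isspace a = false) :
    PySem.Chars.rstrip (u ++ a :: v) = u ++ a :: PySem.Chars.rstrip v := by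
  simp only [PySem.Chars.rstrip, List.reverse_append, List.reverse_cons]
  rw [show v.reverse ++ [a] ++ u.reverse = v.reverse ++ a :: u.reverse by simp,
    pvDropWhile_append_cons _ _ _ ha]
  simp

theorem pvRstrip_allws (u : List Char) (h : u.all PySem.Chars.isspace) :
    PySem.Chars.rstrip u = [] := by
  simp only [PySem.Chars.rstrip]
  have : List.dropWhile PySem.Chars.isspace u.reverse = [] := by
    rw [List.dropWhile_eq_nil_iff]
    intro x hx
    exact (List.all_eq_true.mp h x (List.mem_reverse.mp hx))
  simp [this]

theorem pvStrip_cons_ws (a : Char) (s : List Char) (ha : PySem.Chars.isspace a = true) :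
    PySem.Chars.strip (a :: s) = PySem.Chars.strip s := by
  simp [PySem.Chars.strip, PySem.Chars.lstrip, List.dropWhile, ha]

theorem pvStrip_cons_nonws (a : Char) (s : List Char) (ha : PySem.Chars.isspace a = false) :
    PySem.Chars.strip (a :: s) = a :: PySem.Chars.rstrip s := by
  simp only [PySem.Chars.strip, PySem.Chars.lstrip, List.dropWhile, ha]
  simpa using pvRstrip_append_cons [] s a ha

-- the token the machine will eventually emit for the current segment
def pvTok (cur pend s : List Char) : List Char :=
  if cur = [] then PySem.Chars.strip s else cur ++ PySem.Chars.rstrip (pend ++ s)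

def pvEmit (t : List Char) : List String := if t = [] then [] else [String.ofList t]

-- B's folding function (named for the invariant proof)
def pvStep (st : List String × List Char × List Char) (ch : Char) :
    List String × List Char × List Char :=
  let repos := st.1; let cur := st.2.1; let pend := st.2.2
  if ch = ',' ∨ ch = '\n' then
    ((if cur ≠ [] then repos ++ [String.ofList cur] else repos), [], [])
  else if PySem.Chars.isspace ch then
    (repos, cur, if cur ≠ [] then pend ++ [ch] else pend)
  else
    (repos, cur ++ pend ++ [ch], [])

-- main invariant: running the machine over l from (repos,cur,pend) and flushing
-- yields repos, then the token completed from (cur,pend) by the first segment of l,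
-- then the tokens of the remaining segments
theorem pvScan_eq (l : List Char) :
    ∀ (repos : List String) (cur pend : List Char),
      (cur = [] → pend = []) → pend.all PySem.Chars.isspace →
      (let st := l.foldl pvStep (repos, cur, pend)
       if st.2.1 ≠ [] then st.1 ++ [String.ofList st.2.1] else st.1)
        = repos ++ pvEmit (pvTok cur pend (pvSpD l).headI)
            ++ ((pvSpD l).tail).filterMap pvStripFn := by
  induction l with
  | nil =>
    intro repos cur pend hcp hws
    by_cases hc : cur = []
    · subst hc
      simp [pvSpD, pvTok, pvEmit, PySem.Chars.strip, PySem.Chars.lstrip, PySem.Chars.rstrip]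
    · simp only [List.foldl_nil, pvSpD, List.headI, List.tail, List.filterMap_nil,
        List.append_nil, pvTok, if_neg hc, List.append_nil, pvRstrip_allws pend hws]
      simp [pvEmit, hc]
  | cons a t ih =>
    intro repos cur pend hcp hws
    obtain ⟨s, segs, hs⟩ : ∃ s segs, pvSpD t = s :: segs := by
      cases hh : pvSpD t with
      | nil => exact absurd hh (pvSpD_ne_nil t)
      | cons x y => exact ⟨x, y, rfl⟩
    by_cases hd : a = ',' ∨ a = '\n'
    · -- delimiter: flush cur, reset
      have hstep : pvStep (repos, cur, pend) a
          = ((if cur ≠ [] then repos ++ [String.ofList cur] else repos), [], []) := by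
        simp [pvStep, hd]
      simp only [List.foldl_cons, hstep]
      rw [ih _ [] [] (fun _ => rfl) (by simp)]
      have htok : pvTok cur pend [] = (if cur = [] then [] else cur) := by
        by_cases hc : cur = []
        · simp [pvTok, hc, PySem.Chars.strip, PySem.Chars.lstrip, PySem.Chars.rstrip]
        · simp [pvTok, hc, pvRstrip_allws pend hws]
      simp only [pvSpD, if_pos hd, List.headI, List.tail, hs, List.filterMap_cons, htok]
      by_cases hc : cur = []
      · simp only [hc, if_neg (by simp : ¬ ([] : List Char) ≠ []), pvEmit, if_pos rfl,
          List.append_nil, pvTok]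
        cases hfs : pvStripFn s with
        | none =>
          have : PySem.Chars.strip s = [] := by
            by_contra hne; simp [pvStripFn, hne] at hfs
          simp [pvEmit, this]
        | some v =>
          have hne : PySem.Chars.strip s ≠ [] := by
            intro hz; simp [pvStripFn, hz] at hfs
          have hv : v = String.ofList (PySem.Chars.strip s) := by
            simp [pvStripFn, hne] at hfs; exact hfs.symm
          simp [pvEmit, hne, hv]
      · simp only [if_pos hc, pvEmit, if_neg hc, pvTok]
        cases hfs : pvStripFn s with
        | none =>
          have : PySem.Chars.strip s = [] := by
            by_contra hne; simp [pvStripFn, hne] at hfs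
          simp [pvEmit, this]
        | some v =>
          have hne : PySem.Chars.strip s ≠ [] := by
            intro hz; simp [pvStripFn, hz] at hfs
          have hv : v = String.ofList (PySem.Chars.strip s) := by
            simp [pvStripFn, hne] at hfs; exact hfs.symm
          simp [pvEmit, hne, hv]
    · have hsplit : pvSpD (a :: t) = (a :: s) :: segs := by
        simp [pvSpD, if_neg hd, hs, List.modifyHead]
      by_cases hws_a : PySem.Chars.isspace a
      · -- whitespace: goes to pend (or is dropped while cur = [])
        have hstep : pvStep (repos, cur, pend) a
            = (repos, cur, if cur ≠ [] then pend ++ [a] else pend) := by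
          simp [pvStep, hd, hws_a]
        simp only [List.foldl_cons, hstep]
        by_cases hc : cur = []
        · have hp : pend = [] := hcp hc
          subst hc; subst hp
          simp only [if_neg (by simp : ¬ ([] : List Char) ≠ [])]
          rw [ih _ [] [] (fun _ => rfl) (by simp)]
          simp [hsplit, hs, pvTok, pvStrip_cons_ws a s hws_a]
        · simp only [if_pos hc]
          rw [ih _ cur (pend ++ [a]) (fun h => absurd h hc)
              (by simp [List.all_append, hws, hws_a])]
          simp only [hsplit, hs, List.headI, List.tail, pvTok, if_neg hc, List.append_assoc,
            List.singleton_append]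
      · -- ordinary character: commit pend and the character into cur
        have hstep : pvStep (repos, cur, pend) a = (repos, cur ++ pend ++ [a], []) := by
          simp [pvStep, hd, hws_a]
        simp only [List.foldl_cons, hstep]
        rw [ih _ (cur ++ pend ++ [a]) [] (by simp) (by simp)]
        have hne : cur ++ pend ++ [a] ≠ [] := by simp
        simp only [hsplit, hs, List.headI, List.tail, pvTok, if_neg hne]
        by_cases hc : cur = []
        · have hp : pend = [] := hcp hc
          subst hc; subst hp
          simp [pvTok, pvStrip_cons_nonws a s (by simpa using hws_a)]
        · simp only [pvTok, if_neg hc, pvRstrip_append_cons pend s a (by simpa using hws_a)]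
          simp
  termination_by l.length

-- ===== VERDICT =====
theorem parse_repositories_spec : Claim_equal_parse_repositories := by
  intro repo_input _
  unfold Spec_parse_repositories parse_repositories parse_repositories_alt
  have hB := pvScan_eq repo_input.toList [] [] [] (fun _ => rfl) (by simp)
  by_cases h : repo_input = ""
  · subst h
    simp only [if_pos rfl]
    simpa [pvSpD, pvTok, pvEmit, PySem.Chars.strip, PySem.Chars.lstrip,
      PySem.Chars.rstrip] using hB.symm
  · rw [if_neg h]
    rw [pvSplitOn_eq, pvA_eq]
    rw [show (fun (st : List String × List Char × List Char) ch =>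
        let repos := st.1; let cur := st.2.1; let pend := st.2.2
        if ch = ',' ∨ ch = '\n' then
          ((if cur ≠ [] then repos ++ [String.ofList cur] else repos), ([] : List Char), ([] : List Char))
        else if PySem.Chars.isspace ch then
          (repos, cur, if cur ≠ [] then pend ++ [ch] else pend)
        else
          (repos, cur ++ pend ++ [ch], [])) = pvStep from rfl]
    rw [hB]
    obtain ⟨s, segs, hs⟩ : ∃ s segs, pvSpD repo_input.toList = s :: segs := by
      cases hh : pvSpD repo_input.toList with
      | nil => exact absurd hh (pvSpD_ne_nil _)
      | cons x y => exact ⟨x, y, rfl⟩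
    simp only [hs, List.headI, List.tail, List.filterMap_cons, pvTok, if_pos rfl]
    cases hfs : pvStripFn s with
    | none =>
      have : PySem.Chars.strip s = [] := by
        by_contra hne; simp [pvStripFn, hne] at hfs
      simp [pvEmit, this]
    | some v =>
      have hne : PySem.Chars.strip s ≠ [] := by
        intro hz; simp [pvStripFn, hz] at hfs
      have hv : v = String.ofList (PySem.Chars.strip s) := by
        simp [pvStripFn, hne] at hfs; exact hfs.symm
      simp [pvEmit, hne, hv]
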